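-- pv_equiv track=rewrite | github.com/sameerSyedNadeem/First-Programming-Project-LOGIC-DOTS | supporting work/thebeauty.py | inColumn
-- ===== SOURCE A (Python) =====
-- def getPositions(board,color):
--     pos=[]
--     for i in range(len(board)):
--         for j in range(len(board[i])):
--             if board[i][j] == color:
--                 pos.append((i,j))
--     return pos
--
-- def inColumn(board, pos, color, N, isTrue=True):
--     pos1 = getPositions(board, color)
--     col=100
--     if isTrue:
--         if pos == 'left':
--             col = 0
--         elif pos == 'right':
--             col = 2
--         elif pos == 'middle':
--             col = 1
--         occurs = 0
--         for i in range(len(pos1)):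
--             if pos1[i][1] == col:
--                 occurs += 1
--         if occurs >= N:
--             return True
--         else:
--             return False
--     else:
--         return not inColumn(board, pos, color, N)
-- ===== SOURCE B (Python) =====
-- def inColumn(board, pos, color, N, isTrue=True):
--     col = {'left': 0, 'middle': 1, 'right': 2}.get(pos, 100)
--     occurs = sum(1 for row in board if col < len(row) and row[col] == color)
--     return occurs >= N if isTrue else occurs < N
-- ===== Notes on version B (the rewrite author's own statement) =====
-- stated objective: simpler
-- what changed: Drops the getPositions all-positions table and its two counting passes; B maps the column name through a dict and counts matches in that column in one direct pass over rows, and replaces the not-recursion by returning occurs < N.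
import Mathlib
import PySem

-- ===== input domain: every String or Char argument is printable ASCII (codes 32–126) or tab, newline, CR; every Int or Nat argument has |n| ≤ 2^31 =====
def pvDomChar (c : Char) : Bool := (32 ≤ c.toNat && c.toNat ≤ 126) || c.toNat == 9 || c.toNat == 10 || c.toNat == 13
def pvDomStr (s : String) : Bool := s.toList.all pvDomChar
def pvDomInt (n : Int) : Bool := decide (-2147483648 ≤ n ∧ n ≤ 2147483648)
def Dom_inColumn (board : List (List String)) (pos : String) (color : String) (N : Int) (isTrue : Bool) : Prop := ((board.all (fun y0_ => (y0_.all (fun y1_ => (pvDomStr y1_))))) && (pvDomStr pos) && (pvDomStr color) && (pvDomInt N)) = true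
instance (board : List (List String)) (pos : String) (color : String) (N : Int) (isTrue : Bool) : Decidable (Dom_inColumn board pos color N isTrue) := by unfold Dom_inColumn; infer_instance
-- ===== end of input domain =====

-- B replaces A's all-positions table and two counting passes by a dict column lookup and one direct counting pass over rows (objective: simpler).


-- ===== PORT A =====
-- 'for i in range(len(board)): for j in range(len(board[i])): …' ported as nested folds over enumerate
def getPositions (board : List (List String)) (color : String) : List (Int × Int) :=
  (PySem.List.enumerate board).foldl
    (fun pos p =>
      (PySem.List.enumerate p.2).foldl
        (fun pos q => if q.2 == color then pos ++ [(p.1, q.1)] else pos) pos)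
    []

def inColumn (board : List (List String)) (pos : String) (color : String) (N : Int) (isTrue : Bool) : Bool :=
  if isTrue then
    let pos1 := getPositions board color
    let col : Int := if pos == "left" then 0 else if pos == "right" then 2 else if pos == "middle" then 1 else 100
    let occurs : Int := pos1.foldl (fun occ p => if p.2 == col then occ + 1 else occ) 0
    if occurs ≥ N then true else false
  else
    !(inColumn board pos color N true)
termination_by (if isTrue then 0 else 1)
decreasing_by simp_all

-- ===== PORT B =====
def inColumn_alt (board : List (List String)) (pos : String) (color : String) (N : Int) (isTrue : Bool) : Bool :=
  let col : Int := (PySem.Dict.ofList [("left", (0 : Int)), ("middle", 1), ("right", 2)]).getD pos 100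
  let occurs : Int := board.foldl
    (fun acc row => if col < (row.length : Int) && (PySem.List.pyGet? row col == some color) then acc + 1 else acc) 0
  if isTrue then decide (occurs ≥ N) else decide (occurs < N)

-- ===== PRECONDITION & SPEC =====
def Spec_inColumn (board : List (List String)) (pos : String) (color : String) (N : Int) (isTrue : Bool) (out : Bool) : Prop := out = inColumn_alt board pos color N isTrue
instance (board : List (List String)) (pos : String) (color : String) (N : Int) (isTrue : Bool) (out : Bool) : Decidable (Spec_inColumn board pos color N isTrue out) := by unfold Spec_inColumn; infer_instance

-- ===== CLAIM (what is proved, stated in full; the proofs are below) =====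
def Claim_equal_inColumn : Prop := ∀ (board : List (List String)) (pos : String) (color : String) (N : Int) (isTrue : Bool), Dom_inColumn board pos color N isTrue → Spec_inColumn board pos color N isTrue (inColumn board pos color N isTrue)

-- ===== LEMMAS AND PROOFS =====

-- counting a fixed column inside one enumerated row
theorem enumCount (row : List String) (color : String) (col : Int) (s : Int) :
    (PySem.List.enumerate row s).countP (fun q => q.1 == col && q.2 == color)
      = (if 0 ≤ col - s ∧ row[(col - s).toNat]? = some color then 1 else 0) := by
  induction row generalizing s with
  | nil => simp
  | cons a t ih =>
    rw [PySem.List.enumerate_cons, List.countP_cons, ih (s + 1)]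
    by_cases h : col = s
    · rw [if_neg (fun hh => (by omega : ¬ (0:Int) ≤ col - (s + 1)) hh.1)]
      rw [show (col - s).toNat = 0 from by omega, List.getElem?_cons_zero]
      have h0 : (0:Int) ≤ col - s := by omega
      by_cases hc : a = color <;> simp [h, hc, h0]
    · have hhead : ((s, a).1 == col && (s, a).2 == color) = false := by
        simp
        intro hs
        exact absurd hs.symm h
      simp only [hhead, Bool.false_eq_true, if_false, Nat.add_zero]
      by_cases h0 : 0 ≤ col - s
      · have h0' : 0 ≤ col - (s + 1) := by omega
        rw [show (col - s).toNat = (col - (s + 1)).toNat + 1 from by omega,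
            List.getElem?_cons_succ]
        exact if_congr (by constructor <;> (rintro ⟨_, hx⟩; exact ⟨by omega, hx⟩)) rfl rfl
      · have h0' : ¬ 0 ≤ col - (s + 1) := by omega
        rw [if_neg (fun hh => h0' hh.1), if_neg (fun hh => h0 hh.1)]

-- the per-row condition of B, as a Prop
theorem rowCond (row : List String) (color : String) (col : Int) (h0 : 0 ≤ col) :
    (col < (row.length : Int) && (PySem.List.pyGet? row col == some color))
      = decide (0 ≤ col ∧ row[col.toNat]? = some color) := by
  have : PySem.List.pyGet? row col = row[col.toNat]? := by
    have := PySem.List.pyGet?_natCast (xs := row) (n := col.toNat)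
    simpa [Int.toNat_of_nonneg h0] using this
  rw [this]
  by_cases hl : col < (row.length : Int)
  · simp [hl, h0, beq_eq_decide]
  · have : row[col.toNat]? = none := by
      apply List.getElem?_eq_none
      omega
    simp [hl, this]

-- outer loop of getPositions: column count of the produced positions, row by row
theorem outerCount (bs : List (List String)) (color : String) (col : Int) (s : Int)
    (acc : List (Int × Int)) :
    ((PySem.List.enumerate bs s).foldl
        (fun pos p =>
          (PySem.List.enumerate p.2).foldl
            (fun pos q => if q.2 == color then pos ++ [(p.1, q.1)] else pos) pos)
        acc).countP (fun p => p.2 == col)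
      = acc.countP (fun p => p.2 == col)
        + (bs.map (fun row => if 0 ≤ col ∧ row[col.toNat]? = some color then 1 else 0)).sum := by
  induction bs generalizing s acc with
  | nil => simp
  | cons r rs ih =>
    rw [PySem.List.enumerate_cons, List.foldl_cons, ih,
        PySem.List.foldl_append_if (p := fun q : Int × String => q.2 == color)
          (f := fun q : Int × String => ((s : Int), q.1)),
        List.countP_append, List.countP_map, List.map_cons, List.sum_cons]
    have hfilter : ((PySem.List.enumerate r 0).filter (fun q => q.2 == color)).countP
        ((fun p : Int × Int => p.2 == col) ∘ fun q : Int × String => ((s : Int), q.1))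
        = (PySem.List.enumerate r 0).countP (fun q => q.1 == col && q.2 == color) := by
      rw [List.countP_filter]
      apply List.countP_congr
      intro q _
      simp [Function.comp]
    rw [hfilter, enumCount]
    have hc : (if 0 ≤ col - 0 ∧ r[(col - 0).toNat]? = some color then (1 : Nat) else 0)
        = (if 0 ≤ col ∧ r[col.toNat]? = some color then 1 else 0) := by simp
    rw [hc]
    omega

-- the two column codes agree
theorem colEq (pos : String) :
    (PySem.Dict.ofList [("left", (0 : Int)), ("middle", 1), ("right", 2)]).getD pos 100
      = (if pos == "left" then (0 : Int) else if pos == "right" then 2 else if pos == "middle" then 1 else 100) := by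
  rw [show PySem.Dict.ofList [("left", (0 : Int)), ("middle", 1), ("right", 2)]
        = PySem.Dict.mk [("left", (0 : Int)), ("middle", 1), ("right", 2)] from by decide,
      PySem.Dict.getD_eq_get?_getD,
      PySem.Dict.get?_mk_cons, PySem.Dict.get?_mk_cons, PySem.Dict.get?_mk_cons]
  by_cases h1 : pos = "left"
  · simp [h1]
  · by_cases h2 : pos = "right"
    · simp [h2]
    · by_cases h3 : pos = "middle"
      · simp [h3]
      · simp [Ne.symm h1, Ne.symm h2, Ne.symm h3, h1, h2, h3, PySem.Dict.get?]

-- both occurrence counts are equal, for any fixed nonnegative column code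
theorem occursEqGen (board : List (List String)) (color : String) (col : Int) (h0 : 0 ≤ col) :
    (getPositions board color).foldl (fun occ p => if p.2 == col then occ + 1 else occ) (0 : Int)
      = board.foldl
        (fun acc row => if col < (row.length : Int) && (PySem.List.pyGet? row col == some color) then acc + 1 else acc) (0 : Int) := by
  have hcongr : board.foldl
      (fun acc row => if col < (row.length : Int) && (PySem.List.pyGet? row col == some color) then acc + 1 else acc)
      (0 : Int)
      = board.foldl
      (fun acc row => if 0 ≤ col ∧ row[col.toNat]? = some color then acc + 1 else acc) (0 : Int) := by
    apply PySem.List.foldl_congr_mem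
    intro acc row _
    rw [rowCond row color col h0]
    by_cases h : 0 ≤ col ∧ row[col.toNat]? = some color <;> simp [h]
  refine Eq.trans ?_ hcongr.symm
  clear hcongr
  rw [PySem.List.foldl_if_add_one (l := getPositions board color)
        (p := fun p : Int × Int => p.2 == col) (a := (0 : Int)),
      PySem.List.foldl_ite_add_one]
  have hcnt2 : board.countP (fun row => decide (0 ≤ col ∧ row[col.toNat]? = some color))
      = (board.map (fun row => if 0 ≤ col ∧ row[col.toNat]? = some color then (1 : Nat) else 0)).sum := by
    induction board with
    | nil => simp
    | cons r rs ih =>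
      rw [List.countP_cons, List.map_cons, List.sum_cons, ih]
      by_cases h : 0 ≤ col ∧ r[col.toNat]? = some color <;> simp [h] <;> omega
  have hcnt : (getPositions board color).countP (fun p => p.2 == col)
      = (board.map (fun row => if 0 ≤ col ∧ row[col.toNat]? = some color then (1 : Nat) else 0)).sum := by
    simpa [getPositions] using outerCount board color col 0 []
  rw [hcnt, hcnt2]

-- both occurrence counts are equal at the column codes the two ports compute
theorem occursEq (board : List (List String)) (pos : String) (color : String) :
    (getPositions board color).foldl
        (fun occ p => if p.2 == (if pos == "left" then (0:Int) else if pos == "right" then 2 else if pos == "middle" then 1 else 100) then occ + 1 else occ) (0 : Int)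
      = board.foldl
        (fun acc row => if ((PySem.Dict.ofList [("left", (0 : Int)), ("middle", 1), ("right", 2)]).getD pos 100) < (row.length : Int) && (PySem.List.pyGet? row ((PySem.Dict.ofList [("left", (0 : Int)), ("middle", 1), ("right", 2)]).getD pos 100) == some color) then acc + 1 else acc) (0 : Int) := by
  rw [colEq]
  exact occursEqGen board color _ (by split_ifs <;> norm_num)

theorem inColumn_true (board : List (List String)) (pos : String) (color : String) (N : Int) :
    inColumn board pos color N true = inColumn_alt board pos color N true := by
  unfold inColumn inColumn_alt
  simp only [if_true, if_pos rfl]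
  rw [occursEq board pos color]
  split <;> simp_all

-- ===== VERDICT (by name: the statement is the Claim_ definition above) =====
theorem not_decide_le (N x : Int) : (!decide (N ≤ x)) = decide (x < N) := by
  by_cases h : N ≤ x <;> simp [h] <;> omega

theorem inColumn_spec : Claim_equal_inColumn := by
  intro board pos color N isTrue _
  unfold Spec_inColumn
  cases isTrue
  · rw [inColumn]
    simp only [Bool.false_eq_true, if_false, inColumn_true board pos color N]
    simp only [inColumn_alt, if_true]
    rw [not_decide_le]
    simp
  · exact inColumn_true board pos color N
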